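-- pv_equiv track=rewrite | github.com/Kim-JuYong/DataStructuce_Algorithm | Algorithm/KAKAO/후보키.py | uniqueness
-- ===== SOURCE A (Python) =====
-- def uniqueness(relation, columns):
--     temp = set()
--     for i in range(len(relation)):  # columns들의 조합으로 key를 만들고 set에 저장
--         t = ''
--         for j in columns:
--             t += relation[i][j]
--         temp.add(t)
--     if len(temp) == len(relation):  # set 길이가 relation 길이와 같다면 이는 유일성을 만족한 것임
--         return True
--     return False
-- ===== SOURCE B (Python) =====
-- def uniqueness(relation, columns):
--     keys = sorted(''.join(row[j] for j in columns) for row in relation)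
--     return all(a != b for a, b in zip(keys, keys[1:]))
-- ===== Notes on version B (the rewrite author's own statement) =====
-- stated objective: alternative
-- what changed: Replaces A's hash-set distinctness test (build a set of row keys, compare its size to the row count) with sorting the row-key list and a single scan comparing adjacent pairs.
import Mathlib
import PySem

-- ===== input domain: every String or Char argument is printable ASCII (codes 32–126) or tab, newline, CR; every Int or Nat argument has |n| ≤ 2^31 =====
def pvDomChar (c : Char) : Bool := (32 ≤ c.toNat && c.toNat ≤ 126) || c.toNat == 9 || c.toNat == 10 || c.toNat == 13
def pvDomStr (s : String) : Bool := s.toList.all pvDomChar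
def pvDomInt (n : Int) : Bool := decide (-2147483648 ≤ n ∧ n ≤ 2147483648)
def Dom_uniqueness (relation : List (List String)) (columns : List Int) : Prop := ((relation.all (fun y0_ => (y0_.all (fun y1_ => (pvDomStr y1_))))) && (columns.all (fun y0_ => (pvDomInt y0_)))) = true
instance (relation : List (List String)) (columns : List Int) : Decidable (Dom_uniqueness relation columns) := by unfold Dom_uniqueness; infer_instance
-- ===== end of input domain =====

-- B replaces A's hash-set distinctness test by sorting the row keys and scanning adjacent pairs (objective: alternative algorithm).

-- ===== PORT A =====
-- set-based: build each row's key by string concatenation over columns, insert into a set, compare sizes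
def uniqueness (relation : List (List String)) (columns : List Int) : Bool :=
  let temp : PySem.Set String :=
    (PySem.List.pyRange 0 relation.length 1).foldl
      (fun s i =>
        let t := columns.foldl
          (fun t j => t ++ PySem.List.pyGetD (PySem.List.pyGetD relation i []) j "") ""
        PySem.Set.add s t)
      PySem.Set.empty
  if PySem.Set.len temp = (relation.length : Int) then true else false

-- ===== PORT B =====
-- Source B: keys = sorted(''.join(row[j] for j in columns) for row in relation); all(a != b for a,b in zip(keys, keys[1:]))
def rowKey (columns : List Int) (row : List String) : String :=
  String.join (columns.map (fun j => PySem.List.pyGetD row j ""))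

def uniqueness_alt (relation : List (List String)) (columns : List Int) : Bool :=
  let keys := PySem.List.sorted (relation.map (rowKey columns)) (fun s => s) false
  (keys.zip (keys.drop 1)).all (fun p => p.1 != p.2)

-- ===== PRECONDITION & SPEC =====
-- Pre_ excludes exactly the inputs where relation[i][j] raises IndexError: some column index out of Python range for some row.
def Pre_uniqueness (relation : List (List String)) (columns : List Int) : Prop :=
  ∀ row ∈ relation, ∀ j ∈ columns, PySem.Raise.InRange row.length j

instance (relation : List (List String)) (columns : List Int) : Decidable (Pre_uniqueness relation columns) := by
  unfold Pre_uniqueness; infer_instance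

def pvWitness_uniqueness : List (List String) × List Int := ([["a", "b"], ["a", "c"]], [0, 1])

def Spec_uniqueness (relation : List (List String)) (columns : List Int) (out : Bool) : Prop := out = uniqueness_alt relation columns
instance (relation : List (List String)) (columns : List Int) (out : Bool) : Decidable (Spec_uniqueness relation columns out) := by unfold Spec_uniqueness; infer_instance

-- ===== CLAIM (what is proved, stated in full; the proofs are below) =====
def Claim_equal_uniqueness : Prop := ∀ (relation : List (List String)) (columns : List Int), Dom_uniqueness relation columns → Pre_uniqueness relation columns → Spec_uniqueness relation columns (uniqueness relation columns)

-- ===== LEMMAS AND PROOFS =====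

-- string folds pull the accumulator out front
theorem strfoldl_out (l : List String) (t0 : String) :
    l.foldl (· ++ ·) t0 = t0 ++ l.foldl (· ++ ·) "" := by
  induction l generalizing t0 with
  | nil => simp
  | cons a l ih =>
      rw [List.foldl_cons, List.foldl_cons, ih (t0 ++ a), ih ("" ++ a)]
      simp [String.append_assoc]

-- A's concatenation loop computes the same key as B's join
theorem foldl_append_eq_join {α : Type} (f : α → String) (l : List α) (t0 : String) :
    l.foldl (fun t j => t ++ f j) t0 = t0 ++ String.join (l.map f) := by
  rw [← List.foldl_map, String.join, strfoldl_out]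

-- PySem.Set.ofList is a sublist of its argument
theorem ofList_sublist {α : Type} [BEq α] [LawfulBEq α] (xs : List α) :
    (PySem.Set.ofList xs).Sublist xs := by
  induction xs using List.reverseRecOn with
  | nil => simp [PySem.Set.ofList_nil]
  | append_singleton ys y ih =>
      rw [PySem.Set.ofList_append_singleton, PySem.Set.add_eq_ite]
      split
      · exact ih.trans (List.sublist_append_left ys [y])
      · exact ih.append (List.Sublist.refl [y])

theorem length_ofList_eq_iff {α : Type} [BEq α] [LawfulBEq α] (xs : List α) :
    (PySem.Set.ofList xs).length = xs.length ↔ xs.Nodup := by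
  constructor
  · intro h
    have heq := (ofList_sublist xs).eq_of_length h
    rw [← heq]; exact PySem.Set.nodup_ofList xs
  · intro h; rw [PySem.Set.ofList_eq_self_of_nodup xs h]

-- the adjacent-pair scan is IsChain (≠)
theorem allzip_iff_chain {α : Type} [BEq α] [LawfulBEq α] (l : List α) :
    ((l.zip (l.drop 1)).all (fun p => p.1 != p.2) = true) ↔ l.IsChain (· ≠ ·) := by
  induction l with
  | nil => simp
  | cons x xs ih =>
      cases xs with
      | nil => simp
      | cons y t =>
          simp only [List.drop_one, List.tail_cons, List.zip_cons_cons, List.all_cons,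
            Bool.and_eq_true, List.isChain_cons_cons, bne_iff_ne] at *
          rw [← ih]

-- on a ≤-sorted list, adjacent distinctness upgrades to IsChain (<)
theorem chain_lt_of_le_ne {α : Type} [LinearOrder α] (l : List α)
    (hle : l.IsChain (· ≤ ·)) (hne : l.IsChain (· ≠ ·)) : l.IsChain (· < ·) := by
  induction l with
  | nil => exact List.IsChain.nil
  | cons x xs ih =>
      cases xs with
      | nil => exact List.IsChain.singleton x
      | cons y t =>
          rw [List.isChain_cons_cons] at *
          exact ⟨lt_of_le_of_ne hle.1 hne.1, ih hle.2 hne.2⟩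

-- on a ≤-sorted list, IsChain (≠) ↔ Nodup
theorem chain_ne_iff_nodup {α : Type} [LinearOrder α] (l : List α)
    (hle : l.IsChain (· ≤ ·)) : l.IsChain (· ≠ ·) ↔ l.Nodup := by
  constructor
  · intro hne
    have hlt := chain_lt_of_le_ne l hle hne
    have hp : l.Pairwise (· < ·) := List.isChain_iff_pairwise.mp hlt
    exact hp.imp ne_of_lt
  · intro h; exact List.Pairwise.isChain h

-- A in closed form: the set is ofList of the keys
theorem uniqueness_eq_decide (relation : List (List String)) (columns : List Int) :
    uniqueness relation columns
      = decide ((PySem.Set.ofList (relation.map (rowKey columns))).length = relation.length) := by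
  unfold uniqueness
  have hfold :
      (PySem.List.pyRange 0 relation.length 1).foldl
        (fun (s : PySem.Set String) i =>
          PySem.Set.add s (columns.foldl
            (fun t j => t ++ PySem.List.pyGetD (PySem.List.pyGetD relation i []) j "") ""))
        PySem.Set.empty
      = relation.foldl (fun (s : PySem.Set String) row =>
          PySem.Set.add s (columns.foldl
            (fun t j => t ++ PySem.List.pyGetD row j "") "")) PySem.Set.empty := by
    exact PySem.List.foldl_pyRange_zero_pyGetD relation []
      (fun s row => PySem.Set.add s (columns.foldl
        (fun t j => t ++ PySem.List.pyGetD row j "") "")) PySem.Set.empty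
  simp only [hfold]
  have hkey : ∀ row : List String,
      columns.foldl (fun t j => t ++ PySem.List.pyGetD row j "") "" = rowKey columns row := by
    intro row
    rw [foldl_append_eq_join (fun j => PySem.List.pyGetD row j "") columns ""]
    simp [rowKey]
  have hof :
      relation.foldl (fun (s : PySem.Set String) row =>
        PySem.Set.add s (columns.foldl (fun t j => t ++ PySem.List.pyGetD row j "") "")) PySem.Set.empty
      = PySem.Set.ofList (relation.map (rowKey columns)) := by
    rw [PySem.Set.ofList_eq_foldl, ← List.foldl_map]
    simp only [hkey]
    rfl
  rw [hof]
  simp [PySem.Set.len]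

-- ===== VERDICT (by name: the statement is the Claim_ definition above) =====
theorem uniqueness_spec : Claim_equal_uniqueness := by
  intro relation columns _ _
  unfold Spec_uniqueness uniqueness_alt
  set keys := relation.map (rowKey columns) with hkeys
  set skeys := PySem.List.sorted keys (fun s => s) false with hs
  have hperm : skeys.Perm keys := PySem.List.sorted_perm keys (fun s => s) false
  have hle : skeys.IsChain (· ≤ ·) :=
    List.Pairwise.isChain (by simpa using PySem.List.sorted_pairwise keys (fun s => s))
  rw [uniqueness_eq_decide]
  have hlen : relation.length = keys.length := by simp [hkeys]
  have h1 : ((PySem.Set.ofList keys).length = relation.length) ↔ keys.Nodup := by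
    rw [hlen]; exact length_ofList_eq_iff keys
  have h2 : ((skeys.zip (skeys.drop 1)).all (fun p => p.1 != p.2) = true) ↔ keys.Nodup := by
    rw [allzip_iff_chain skeys, chain_ne_iff_nodup skeys hle]
    exact hperm.nodup_iff
  rcases Bool.eq_false_or_eq_true ((skeys.zip (skeys.drop 1)).all (fun p => p.1 != p.2)) with hb | hb
  · rw [hb]
    exact decide_eq_true (h1.mpr (h2.mp hb))
  · rw [hb]
    exact decide_eq_false (fun hc => by have ht := h2.mpr (h1.mp hc); rw [hb] at ht; cases ht)
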